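-- pv_equiv track=rewrite | github.com/Uttampatel1/student_edu | comninations.py | categorize_scores
-- ===== SOURCE A (Python) =====
-- def categorize_scores(scores):
--     categories = []
--     for score in scores:
--         if score < 50:
--             categories.append('Fail')
--         elif 50 <= score < 60:
--             categories.append('Second Class')
--         elif 60 <= score < 75:
--             categories.append('First Class')
--         else:
--             categories.append('First Class with Distinction')
--     return categories
-- ===== SOURCE B (Python) =====
-- _BOUNDS = [50, 60, 75]
-- _LABELS = ['Fail', 'Second Class', 'First Class', 'First Class with Distinction']
--
-- def categorize_scores(scores):
--     return [_LABELS[sum(b <= s for b in _BOUNDS)] for s in scores]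
-- ===== Notes on version B (the rewrite author's own statement) =====
-- stated objective: idiomatic
-- what changed: Replaces the if/elif comparison cascade with a table-driven lookup: a boundary list and a parallel label list, indexing by the number of boundaries not exceeding the score.
import Mathlib
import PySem

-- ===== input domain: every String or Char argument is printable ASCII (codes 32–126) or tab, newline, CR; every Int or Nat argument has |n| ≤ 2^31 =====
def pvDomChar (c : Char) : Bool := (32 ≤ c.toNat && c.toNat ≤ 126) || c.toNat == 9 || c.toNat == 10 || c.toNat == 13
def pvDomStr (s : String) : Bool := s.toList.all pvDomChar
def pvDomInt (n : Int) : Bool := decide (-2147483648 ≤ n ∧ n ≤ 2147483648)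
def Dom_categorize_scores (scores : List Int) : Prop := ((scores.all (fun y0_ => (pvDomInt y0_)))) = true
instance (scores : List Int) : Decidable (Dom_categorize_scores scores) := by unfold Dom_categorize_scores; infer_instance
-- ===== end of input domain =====

-- B replaces the if/elif cascade with a table-driven lookup (boundary list + parallel labels); objective: idiomatic.


-- ===== PORT A =====
def categorize_scores (scores : List Int) : List String :=
  scores.foldl (fun categories score =>
    if score < 50 then categories ++ ["Fail"]
    else if 50 ≤ score ∧ score < 60 then categories ++ ["Second Class"]
    else if 60 ≤ score ∧ score < 75 then categories ++ ["First Class"]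
    else categories ++ ["First Class with Distinction"]) []

-- ===== PORT B =====
def pvBounds : List Int := [50, 60, 75]
def pvLabels : List String := ["Fail", "Second Class", "First Class", "First Class with Distinction"]
-- the index sum(b <= s for b in _BOUNDS) is always 0..3, so the Python indexing never raises; getD is exact here
def categorize_scores_alt (scores : List Int) : List String :=
  scores.map (fun s => pvLabels.getD (pvBounds.countP (fun b => decide (b ≤ s))) "")

-- ===== PRECONDITION & SPEC =====
def Spec_categorize_scores (scores : List Int) (out : List String) : Prop := out = categorize_scores_alt scores
instance (scores : List Int) (out : List String) : Decidable (Spec_categorize_scores scores out) := by unfold Spec_categorize_scores; infer_instance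

-- ===== CLAIM (what is proved, stated in full; the proofs are below) =====
def Claim_equal_categorize_scores : Prop := ∀ (scores : List Int), Dom_categorize_scores scores → Spec_categorize_scores scores (categorize_scores scores)

-- ===== LEMMAS AND PROOFS =====
def pvCat1 (score : Int) : String :=
  if score < 50 then "Fail"
  else if 50 ≤ score ∧ score < 60 then "Second Class"
  else if 60 ≤ score ∧ score < 75 then "First Class"
  else "First Class with Distinction"

theorem categorize_scores_foldl (scores : List Int) (acc : List String) :
    scores.foldl (fun categories score =>
      if score < 50 then categories ++ ["Fail"]
      else if 50 ≤ score ∧ score < 60 then categories ++ ["Second Class"]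
      else if 60 ≤ score ∧ score < 75 then categories ++ ["First Class"]
      else categories ++ ["First Class with Distinction"]) acc
    = acc ++ scores.map pvCat1 := by
  induction scores generalizing acc with
  | nil => simp
  | cons s t ih =>
    simp only [List.foldl_cons, List.map_cons, ih, pvCat1]
    split_ifs <;> simp

theorem pvCat1_eq (s : Int) :
    pvCat1 s = pvLabels.getD (pvBounds.countP (fun b => decide (b ≤ s))) "" := by
  unfold pvCat1 pvBounds pvLabels
  rcases lt_or_ge s 50 with h | h
  · simp [h, show ¬(50:Int) ≤ s by omega, show ¬(60:Int) ≤ s by omega,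
      show ¬(75:Int) ≤ s by omega]
  · rcases lt_or_ge s 60 with h2 | h2
    · simp [h, h2, show ¬s < 50 by omega, show ¬(60:Int) ≤ s by omega,
        show ¬(75:Int) ≤ s by omega]
    · rcases lt_or_ge s 75 with h3 | h3
      · simp [h, h2, h3, show ¬s < 50 by omega, show ¬(75:Int) ≤ s by omega]
      · simp [h, h2, h3, show ¬s < 50 by omega, show ¬s < 60 by omega,
          show ¬s < 75 by omega]

-- ===== VERDICT (by name: the statement is the Claim_ definition above) =====
theorem categorize_scores_spec : Claim_equal_categorize_scores := by
  intro scores _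
  unfold Spec_categorize_scores categorize_scores categorize_scores_alt
  rw [categorize_scores_foldl]
  simp [pvCat1_eq]
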